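-- pv_equiv track=rewrite | github.com/Blockchain-Unmasked/ai-dev-lab | mcp-server/execute_website_audit.py | analyze_content_types
-- ===== SOURCE A (Python) =====
-- def analyze_content_types(pages):
--     """Analyze content types across pages"""
--     content_types = {
--         "html_pages": 0,
--         "forms": 0,
--         "images": 0,
--         "documents": 0,
--         "other": 0
--     }
--
--     for page in pages:
--         if page.get("content_type", "").startswith("text/html"):
--             content_types["html_pages"] += 1
--         elif "form" in page.get("url", "").lower():
--             content_types["forms"] += 1
--         else:
--             content_types["other"] += 1
--
--     return content_types
-- ===== SOURCE B (Python) =====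
-- def analyze_content_types(pages):
--     """Analyze content types across pages"""
--     def is_html(page):
--         return page.get("content_type", "").startswith("text/html")
--
--     html = sum(1 for p in pages if is_html(p))
--     forms = sum(1 for p in pages
--                 if not is_html(p) and "form" in p.get("url", "").lower())
--     return {
--         "html_pages": html,
--         "forms": forms,
--         "images": 0,
--         "documents": 0,
--         "other": len(pages) - html - forms,
--     }
-- ===== Notes on version B (the rewrite author's own statement) =====
-- stated objective: alternative
-- what changed: Replaces the single mutating if/elif/else loop over a dict with independent filtered counts (html via startswith, forms via a count excluding html pages) and derives the 'other' bucket arithmetically as len(pages) - html - forms, building the result dict once at the end.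
import Mathlib
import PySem

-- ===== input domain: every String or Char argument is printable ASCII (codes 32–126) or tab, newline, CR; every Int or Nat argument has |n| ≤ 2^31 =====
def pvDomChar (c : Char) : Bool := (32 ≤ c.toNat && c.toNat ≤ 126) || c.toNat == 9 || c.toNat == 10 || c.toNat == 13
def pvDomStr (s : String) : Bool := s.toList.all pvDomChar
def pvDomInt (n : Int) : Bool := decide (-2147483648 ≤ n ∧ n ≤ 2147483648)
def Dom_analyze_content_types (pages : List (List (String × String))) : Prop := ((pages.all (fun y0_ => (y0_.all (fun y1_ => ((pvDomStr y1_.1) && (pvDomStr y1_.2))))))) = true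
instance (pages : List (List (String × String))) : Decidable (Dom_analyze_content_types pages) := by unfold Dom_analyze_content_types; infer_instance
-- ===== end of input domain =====

-- B replaces A's single mutating if/elif/else loop by independent filtered counts plus
-- an arithmetic identity for the 'other' bucket (alternative decomposition, same O(n)).

-- ===== PORT A =====
-- page.get("content_type", "").startswith("text/html")
def pvIsHtml (page : List (String × String)) : Bool :=
  PySem.Str.startswith ((PySem.Dict.mk page).getD "content_type" "") "text/html"

-- "form" in page.get("url", "").lower()
def pvFormUrl (page : List (String × String)) : Bool :=
  PySem.Str.isIn "form" (PySem.Str.lower ((PySem.Dict.mk page).getD "url" ""))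

def analyze_content_types (pages : List (List (String × String))) : List (String × Int) :=
  let init : PySem.Dict String Int :=
    ((((PySem.Dict.empty.insert "html_pages" 0).insert "forms" 0).insert "images" 0).insert
        "documents" 0).insert "other" 0
  (pages.foldl
      (fun ct page =>
        if pvIsHtml page then ct.modify "html_pages" 0 (· + 1)
        else if pvFormUrl page then ct.modify "forms" 0 (· + 1)
        else ct.modify "other" 0 (· + 1))
      init).items

-- ===== PORT B =====
def analyze_content_types_alt (pages : List (List (String × String))) : List (String × Int) :=
  let html : Int := (pages.countP pvIsHtml : Int)
  let forms : Int := (pages.countP (fun p => !pvIsHtml p && pvFormUrl p) : Int)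
  [("html_pages", html), ("forms", forms), ("images", 0), ("documents", 0),
    ("other", (pages.length : Int) - html - forms)]

-- ===== PRECONDITION & SPEC =====
def Spec_analyze_content_types (pages : List (List (String × String))) (out : List (String × Int)) : Prop := out = analyze_content_types_alt pages
instance (pages : List (List (String × String))) (out : List (String × Int)) : Decidable (Spec_analyze_content_types pages out) := by unfold Spec_analyze_content_types; infer_instance

-- ===== CLAIM (what is proved, stated in full; the proofs are below) =====
def Claim_equal_analyze_content_types : Prop := ∀ (pages : List (List (String × String))), Dom_analyze_content_types pages → Spec_analyze_content_types pages (analyze_content_types pages)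

-- ===== LEMMAS AND PROOFS =====

-- the dict A's loop maintains, parametrised by the three live counters
def pvCt (h f o : Int) : PySem.Dict String Int :=
  ((((PySem.Dict.empty.insert "html_pages" h).insert "forms" f).insert "images" 0).insert
      "documents" 0).insert "other" o

lemma pvCt_mod_html (h f o : Int) : (pvCt h f o).modify "html_pages" 0 (· + 1) = pvCt (h + 1) f o := by
  rfl

lemma pvCt_mod_forms (h f o : Int) : (pvCt h f o).modify "forms" 0 (· + 1) = pvCt h (f + 1) o := by
  rfl

lemma pvCt_mod_other (h f o : Int) : (pvCt h f o).modify "other" 0 (· + 1) = pvCt h f (o + 1) := by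
  rfl

lemma pvCt_congr {h h' f f' o o' : Int} (eh : h = h') (ef : f = f') (eo : o = o') :
    pvCt h f o = pvCt h' f' o' := by rw [eh, ef, eo]

lemma pvCt_items (h f o : Int) : (pvCt h f o).items
    = [("html_pages", h), ("forms", f), ("images", 0), ("documents", 0), ("other", o)] := rfl

lemma pv_loop (pages : List (List (String × String))) (h f o : Int) :
    pages.foldl
        (fun ct page =>
          if pvIsHtml page then ct.modify "html_pages" 0 (· + 1)
          else if pvFormUrl page then ct.modify "forms" 0 (· + 1)
          else ct.modify "other" 0 (· + 1))
        (pvCt h f o)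
      = pvCt (h + pages.countP pvIsHtml)
          (f + pages.countP (fun p => !pvIsHtml p && pvFormUrl p))
          (o + pages.countP (fun p => !pvIsHtml p && !pvFormUrl p)) := by
  induction pages generalizing h f o with
  | nil => simp
  | cons p ps ih =>
      simp only [List.foldl_cons, List.countP_cons]
      by_cases hh : pvIsHtml p
      · rw [if_pos hh, pvCt_mod_html, ih]
        simp only [hh]
        exact pvCt_congr (by push_cast; ring) rfl rfl
      · rw [if_neg hh]
        by_cases hf : pvFormUrl p
        · rw [if_pos hf, pvCt_mod_forms, ih]
          simp only [hh, hf, Bool.not_true, Bool.not_false, Bool.and_self, Bool.true_and]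
          exact pvCt_congr rfl (by push_cast; ring) rfl
        · rw [if_neg hf, pvCt_mod_other, ih]
          simp only [hh, hf, Bool.not_false, Bool.true_and, Bool.and_self]
          exact pvCt_congr rfl rfl (by push_cast; ring)

lemma pv_count_split (pages : List (List (String × String))) :
    pages.countP pvIsHtml + pages.countP (fun p => !pvIsHtml p && pvFormUrl p)
      + pages.countP (fun p => !pvIsHtml p && !pvFormUrl p) = pages.length := by
  induction pages with
  | nil => simp
  | cons p ps ih =>
      simp only [List.countP_cons, List.length_cons]
      by_cases hh : pvIsHtml p <;> by_cases hf : pvFormUrl p <;> simp [hh, hf] <;> omega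

-- ===== VERDICT (by name: the statement is the Claim_ definition above) =====
theorem analyze_content_types_spec : Claim_equal_analyze_content_types := by
  intro pages _
  show analyze_content_types pages = analyze_content_types_alt pages
  have hsplit := pv_count_split pages
  unfold analyze_content_types analyze_content_types_alt
  show (pages.foldl _ (pvCt 0 0 0)).items = _
  rw [pv_loop, pvCt_items]
  simp only [zero_add, List.cons.injEq, Prod.mk.injEq, and_true, true_and]
  omega
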